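-- pv_equiv track=rewrite | github.com/KraXen72/slovak_kyria | helpercli.py | find_keycodes
-- ===== SOURCE A (Python) =====
-- def find_keycodes(lines):
--     start = -1
--     end = -1
--     for line in lines:
--         if "custom_keycodes" in line:
--             start = lines.index(line)
--             break
--     lines = lines[start:]
--     for line in lines:
--         if "}" in line:
--             end = lines.index(line)
--             break
--
--     lines = lines[:end + 1][1:-1]
--     keycodes = []
--     for line in lines:
--         keycode = line.replace(" ", "")
--         if "=" in line:
--             keycode = keycode.split("=")[0]
--         else:
--             keycode = line.split(",")[0]
--
--         # {"name": "E./", "title": "E ACUTE", "shortName": "E_ACUTE"}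
--         # TODO when vial supports unicode, redo this into proper unicode characters
--         name = keycode.replace(" ", "")
--         if "ALT_LOCAL_KEYS" in name:
--             continue
--         elif "_ACUTE" in name:
--             tempname = name.replace("_ACUTE", "")
--             name = "/\n" + tempname
--         elif "_CARON" in name:
--             tempname = name.replace("_CARON", "")
--             name = "v\n" + tempname
--         elif "_UMLAU" in name:
--             tempname = name.replace("_UMLAU", "")
--             name = "..\n" + tempname
--         elif "_CCIRC" in name:
--             tempname = name.replace("_CCIRC", "")
--             name = "^\n" + tempname
--
--         formatted = {
--             "name": name.replace(" ", ""),
--             "title": keycode.replace(" ", "").replace("_", " "),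
--             "shortName": keycode.replace(" ", "")
--         }
--         keycodes.append(formatted)
--
--     # add my customKeys i use in lwm and obs
--     # overrides = [
--     #     {
--     #         "name": "lwm:\nhide all",
--     #         "title": "C(LGUI(KC_KP_0))",
--     #         "shortName": "2402" #0x962
--     #     },
--     #     {
--     #         "name": "lwm:\ndiscord",
--     #         "title": "C(LGUI(KC_KP_1))",
--     #         "shortName": "2393" #0x959
--     #     },
--     #     {
--     #         "name": "lwm:\ndisc+aimp",
--     #         "title": "C(LGUI(KC_KP_2))",
--     #         "shortName": "2394" #0x95A
--     #     },
--     #     {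
--     #         "name": "lwm:\nteams",
--     #         "title": "C(LGUI(KC_KP_3))",
--     #         "shortName": "2395" #0x95B
--     #     },
--     #     {
--     #         "name": "obs:\nfreeze cam",
--     #         "title": "C(LGUI(KC_KP_4))",
--     #         "shortName": "2396" #0x95C
--     #     }
--     # ]
--     # for over in overrides:
--     #     keycodes.append(over)
--
--     return keycodes
-- ===== SOURCE B (Python) =====
-- def _fmt(line):
--     keycode = line.replace(" ", "")
--     if "=" in line:
--         keycode = keycode.split("=")[0]
--     else:
--         keycode = line.split(",")[0]
--     name = keycode.replace(" ", "")
--     if "ALT_LOCAL_KEYS" in name: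
--         return None
--     if "_ACUTE" in name:
--         name = "/\n" + name.replace("_ACUTE", "")
--     elif "_CARON" in name:
--         name = "v\n" + name.replace("_CARON", "")
--     elif "_UMLAU" in name:
--         name = "..\n" + name.replace("_UMLAU", "")
--     elif "_CCIRC" in name:
--         name = "^\n" + name.replace("_CCIRC", "")
--     return {
--         "name": name.replace(" ", ""),
--         "title": keycode.replace(" ", "").replace("_", " "),
--         "shortName": keycode.replace(" ", ""),
--     }
--
--
-- def find_keycodes(lines):
--     # single pass: skip until the 'custom_keycodes' line, buffer until the '}' line
--     in_block = False
--     buf = []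
--     for line in lines:
--         if not in_block:
--             if "custom_keycodes" in line:
--                 if "}" in line:
--                     return []
--                 in_block = True
--         else:
--             if "}" in line:
--                 return [d for d in map(_fmt, buf) if d is not None]
--             buf.append(line)
--     return []
-- ===== Notes on version B (the rewrite author's own statement) =====
-- stated objective: simpler
-- what changed: A scans for the 'custom_keycodes' line, calls list.index, slices the list twice, scans again for '}' and then runs a second formatting loop with continue; B does one stateful pass (skip-until-marker / in-block-with-buffer) and formats the buffered lines with an Option-returning per-line helper, returning [] when the block never opens or never closes.
import Mathlib
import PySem

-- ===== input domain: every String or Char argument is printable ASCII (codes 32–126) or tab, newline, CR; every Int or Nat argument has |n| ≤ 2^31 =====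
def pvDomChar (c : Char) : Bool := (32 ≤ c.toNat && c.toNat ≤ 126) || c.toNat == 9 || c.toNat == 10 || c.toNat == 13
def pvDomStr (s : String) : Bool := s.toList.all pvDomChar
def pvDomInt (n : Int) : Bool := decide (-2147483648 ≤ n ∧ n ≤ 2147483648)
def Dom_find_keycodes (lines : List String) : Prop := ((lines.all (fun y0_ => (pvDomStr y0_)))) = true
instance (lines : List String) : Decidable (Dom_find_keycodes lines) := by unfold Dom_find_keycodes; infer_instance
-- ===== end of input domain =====

-- B replaces A's scan + list.index + double slicing + second scan by one stateful pass with a buffer (objective: simpler).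

-- ===== PORT A =====
-- A's first loop: 'for line in lines: if "custom_keycodes" in line: start = lines.index(line); break'
def fkFindStart (lines : List String) : List String → Int
  | [] => -1
  | line :: rest =>
    if PySem.Str.isIn "custom_keycodes" line then
      -- lines.index(line) never raises here since line ∈ lines, so index? is some and the default is dead
      ((PySem.List.index? lines line).map Int.ofNat).getD (-1)
    else fkFindStart lines rest

-- A's second loop: same shape for '"}" in line' over the sliced list
def fkFindEnd (lines : List String) : List String → Int
  | [] => -1
  | line :: rest =>
    if PySem.Str.isIn "}" line then
      ((PySem.List.index? lines line).map Int.ofNat).getD (-1)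
    else fkFindEnd lines rest

-- body of A's formatting loop (skips ALT_LOCAL_KEYS lines, else appends the formatted dict)
def fkBody (keycodes : List (List (String × String))) (line : String) : List (List (String × String)) :=
  let keycode0 := PySem.Str.replace line " " ""
  -- keycode.split("=")[0] / line.split(",")[0]: sep is nonempty so split? is some, and a split is never empty
  let keycode := if PySem.Str.isIn "=" line then
      ((PySem.Str.split? keycode0 "=").getD []).headD ""
    else ((PySem.Str.split? line ",").getD []).headD ""
  let name0 := PySem.Str.replace keycode " " ""
  if PySem.Str.isIn "ALT_LOCAL_KEYS" name0 then keycodes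
  else
    let name := if PySem.Str.isIn "_ACUTE" name0 then "/\n" ++ PySem.Str.replace name0 "_ACUTE" ""
      else if PySem.Str.isIn "_CARON" name0 then "v\n" ++ PySem.Str.replace name0 "_CARON" ""
      else if PySem.Str.isIn "_UMLAU" name0 then "..\n" ++ PySem.Str.replace name0 "_UMLAU" ""
      else if PySem.Str.isIn "_CCIRC" name0 then "^\n" ++ PySem.Str.replace name0 "_CCIRC" ""
      else name0
    keycodes ++ [[("name", PySem.Str.replace name " " ""),
                  ("title", PySem.Str.replace (PySem.Str.replace keycode " " "") "_" " "),
                  ("shortName", PySem.Str.replace keycode " " "")]]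

-- everything after 'lines = lines[start:]': end search, 'lines[:end+1][1:-1]', formatting loop
def fkAfterStart (lines1 : List String) : List (List (String × String)) :=
  let e := fkFindEnd lines1 lines1
  (PySem.List.slice (PySem.List.slice lines1 none (some (e + 1))) (some 1) (some (-1))).foldl fkBody []

def find_keycodes (lines : List String) : List (List (String × String)) :=
  let start := fkFindStart lines lines
  fkAfterStart (PySem.List.slice lines (some start) none)

-- ===== PORT B =====
-- B's per-line formatter: None for ALT_LOCAL_KEYS lines, else the formatted dict
def fkFmt (line : String) : Option (List (String × String)) :=
  let keycode0 := PySem.Str.replace line " " ""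
  let keycode := if PySem.Str.isIn "=" line then
      ((PySem.Str.split? keycode0 "=").getD []).headD ""
    else ((PySem.Str.split? line ",").getD []).headD ""
  let name0 := PySem.Str.replace keycode " " ""
  if PySem.Str.isIn "ALT_LOCAL_KEYS" name0 then none
  else
    let name := if PySem.Str.isIn "_ACUTE" name0 then "/\n" ++ PySem.Str.replace name0 "_ACUTE" ""
      else if PySem.Str.isIn "_CARON" name0 then "v\n" ++ PySem.Str.replace name0 "_CARON" ""
      else if PySem.Str.isIn "_UMLAU" name0 then "..\n" ++ PySem.Str.replace name0 "_UMLAU" ""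
      else if PySem.Str.isIn "_CCIRC" name0 then "^\n" ++ PySem.Str.replace name0 "_CCIRC" ""
      else name0
    some [("name", PySem.Str.replace name " " ""),
          ("title", PySem.Str.replace (PySem.Str.replace keycode " " "") "_" " "),
          ("shortName", PySem.Str.replace keycode " " "")]

-- Source B's single for-loop: inBlock flag + buffer
def fkLoop : List String → Bool → List String → List (List (String × String))
  | [], _, _ => []
  | line :: rest, false, buf =>
    if PySem.Str.isIn "custom_keycodes" line then
      if PySem.Str.isIn "}" line then [] else fkLoop rest true buf
    else fkLoop rest false buf
  | line :: rest, true, buf =>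
    if PySem.Str.isIn "}" line then (buf.map fkFmt).filterMap id
    else fkLoop rest true (buf ++ [line])

def find_keycodes_alt (lines : List String) : List (List (String × String)) :=
  fkLoop lines false []

-- ===== PRECONDITION & SPEC =====
def Spec_find_keycodes (lines : List String) (out : List (List (String × String))) : Prop := out = find_keycodes_alt lines
instance (lines : List String) (out : List (List (String × String))) : Decidable (Spec_find_keycodes lines out) := by unfold Spec_find_keycodes; infer_instance

-- ===== CLAIM (what is proved, stated in full; the proofs are below) =====
def Claim_equal_find_keycodes : Prop := ∀ (lines : List String), Dom_find_keycodes lines → Spec_find_keycodes lines (find_keycodes lines)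

-- ===== LEMMAS AND PROOFS =====

-- line predicates (negated, dropWhile-style)
def pNoCustom (l : String) : Bool := !PySem.Str.isIn "custom_keycodes" l
def pNoBrace (l : String) : Bool := !PySem.Str.isIn "}" l

lemma drop_takeWhile_len (p : String → Bool) (l : List String) :
    l.drop (l.takeWhile p).length = l.dropWhile p := by
  nth_rewrite 2 [← List.takeWhile_append_dropWhile (p := p) (l := l)]
  rw [List.drop_left]

-- Python's xs[1:-1]
lemma slice_one_neg_one (xs : List String) :
    PySem.List.slice xs (some 1) (some (-1)) = xs.dropLast.tail := by
  simp [PySem.List.slice, PySem.List.clampIdx]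
  cases xs with
  | nil => simp
  | cons a t =>
    simp [List.dropLast_eq_take]
    cases t with
    | nil => simp
    | cons b u => simp [List.take_succ_cons]

lemma fkFindStart_spec : ∀ (cur pre : List String),
    (∀ x ∈ pre, PySem.Str.isIn "custom_keycodes" x = false) →
    fkFindStart (pre ++ cur) cur =
      (match cur.dropWhile pNoCustom with
       | [] => (-1 : Int)
       | _ :: _ => ((pre.length + (cur.takeWhile pNoCustom).length : Nat) : Int)) := by
  intro cur
  induction cur with
  | nil => intro pre hp; simp [fkFindStart]
  | cons c rest ih =>
    intro pre hp
    by_cases hc : PySem.Str.isIn "custom_keycodes" c = true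
    · have hnot : c ∉ pre := fun hm => by rw [hp c hm] at hc; cases hc
      have hc2 := hc; simp at hc2
      have hidx : PySem.List.index? (pre ++ c :: rest) c = some pre.length := by
        rw [show pre ++ c :: rest = (pre ++ [c]) ++ rest by simp,
            PySem.List.index?_append_of_mem _ (by simp),
            PySem.List.index?_append_singleton_self pre c hnot]
      rw [fkFindStart, if_pos hc, hidx]
      have hd : List.dropWhile pNoCustom (c :: rest) = c :: rest := by
        simp [pNoCustom, List.dropWhile_cons, hc2]
      have ht : List.takeWhile pNoCustom (c :: rest) = [] := by
        simp [pNoCustom, hc2]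
      rw [hd, ht]
      simp
    · have hih := ih (pre ++ [c]) (by
        intro x hx
        rcases List.mem_append.mp hx with h1 | h1
        · exact hp x h1
        · simp at h1; subst h1; simpa using hc)
      have hc2 := hc; simp at hc2
      rw [fkFindStart, if_neg hc, show pre ++ c :: rest = (pre ++ [c]) ++ rest by simp, hih]
      have hd : List.dropWhile pNoCustom (c :: rest) = List.dropWhile pNoCustom rest := by
        simp [pNoCustom, hc2]
      have ht : List.takeWhile pNoCustom (c :: rest) = c :: List.takeWhile pNoCustom rest := by
        simp [pNoCustom, hc2]
      rw [hd, ht]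
      cases List.dropWhile pNoCustom rest <;> simp <;> push_cast <;> ring

lemma fkFindEnd_spec : ∀ (cur pre : List String),
    (∀ x ∈ pre, PySem.Str.isIn "}" x = false) →
    fkFindEnd (pre ++ cur) cur =
      (match cur.dropWhile pNoBrace with
       | [] => (-1 : Int)
       | _ :: _ => ((pre.length + (cur.takeWhile pNoBrace).length : Nat) : Int)) := by
  intro cur
  induction cur with
  | nil => intro pre hp; simp [fkFindEnd]
  | cons c rest ih =>
    intro pre hp
    by_cases hc : PySem.Str.isIn "}" c = true
    · have hnot : c ∉ pre := fun hm => by rw [hp c hm] at hc; cases hc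
      have hc2 := hc; simp at hc2
      have hidx : PySem.List.index? (pre ++ c :: rest) c = some pre.length := by
        rw [show pre ++ c :: rest = (pre ++ [c]) ++ rest by simp,
            PySem.List.index?_append_of_mem _ (by simp),
            PySem.List.index?_append_singleton_self pre c hnot]
      rw [fkFindEnd, if_pos hc, hidx]
      have hd : List.dropWhile pNoBrace (c :: rest) = c :: rest := by
        simp [pNoBrace, List.dropWhile_cons, hc2]
      have ht : List.takeWhile pNoBrace (c :: rest) = [] := by
        simp [pNoBrace, hc2]
      rw [hd, ht]
      simp
    · have hih := ih (pre ++ [c]) (by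
        intro x hx
        rcases List.mem_append.mp hx with h1 | h1
        · exact hp x h1
        · simp at h1; subst h1; simpa using hc)
      have hc2 := hc; simp at hc2
      rw [fkFindEnd, if_neg hc, show pre ++ c :: rest = (pre ++ [c]) ++ rest by simp, hih]
      have hd : List.dropWhile pNoBrace (c :: rest) = List.dropWhile pNoBrace rest := by
        simp [pNoBrace, hc2]
      have ht : List.takeWhile pNoBrace (c :: rest) = c :: List.takeWhile pNoBrace rest := by
        simp [pNoBrace, hc2]
      rw [hd, ht]
      cases List.dropWhile pNoBrace rest <;> simp <;> push_cast <;> ring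

set_option maxHeartbeats 1000000 in
lemma fkBody_eq (acc : List (List (String × String))) (line : String) :
    fkBody acc line = acc ++ (fkFmt line).toList := by
  unfold fkBody fkFmt
  dsimp only
  split <;> (split <;> simp)

lemma foldl_fkBody : ∀ (xs : List String) (acc : List (List (String × String))),
    xs.foldl fkBody acc = acc ++ (xs.map fkFmt).filterMap id := by
  intro xs
  induction xs with
  | nil =>
    intro acc
    rw [List.foldl_nil, List.map_nil, List.filterMap_nil, List.append_nil]
  | cons x t ih =>
    intro acc
    rw [List.foldl_cons, fkBody_eq, ih, List.map_cons, List.filterMap_cons, List.append_assoc]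
    cases fkFmt x <;> rfl

-- A's tail phase on a list of length ≤ 1 (the no-custom_keycodes case) gives []
lemma fkAfterStart_small : ∀ (lines1 : List String), lines1.length ≤ 1 → fkAfterStart lines1 = [] := by
  intro lines1 hlen
  match lines1, hlen with
  | [], _ => rfl
  | [x], _ =>
    by_cases hq : PySem.Str.isIn "}" x = true
    · have he : fkFindEnd [x] [x] = 0 := by
        rw [fkFindEnd, if_pos hq, PySem.List.index?_cons_self]; rfl
      unfold fkAfterStart
      dsimp only
      rw [he, show ((0 : Int) + 1) = ((1 : Nat) : Int) by norm_num,
          PySem.List.slice_to _ (by positivity), slice_one_neg_one]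
      rfl
    · have he : fkFindEnd [x] [x] = -1 := by
        rw [fkFindEnd, if_neg hq]; rfl
      unfold fkAfterStart
      dsimp only
      rw [he, show ((-1 : Int) + 1) = ((0 : Nat) : Int) by norm_num,
          PySem.List.slice_to _ (by norm_num), slice_one_neg_one]
      rfl

-- the common normal form of both programs
def fkSpecVal (lines : List String) : List (List (String × String)) :=
  match lines.dropWhile pNoCustom with
  | [] => []
  | l :: suf =>
    if PySem.Str.isIn "}" l then []
    else match suf.dropWhile pNoBrace with
      | [] => []
      | _ :: _ => ((suf.takeWhile pNoBrace).map fkFmt).filterMap id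

lemma find_keycodes_eq (lines : List String) : find_keycodes lines = fkSpecVal lines := by
  unfold find_keycodes fkSpecVal
  dsimp only
  have h1 := fkFindStart_spec lines [] (by simp)
  simp only [List.nil_append, List.length_nil, Nat.zero_add] at h1
  cases h : lines.dropWhile pNoCustom with
  | nil =>
    rw [h] at h1; dsimp only at h1
    rw [h1, PySem.List.slice_from_neg_one]
    exact fkAfterStart_small _ (by simp; omega)
  | cons l suf =>
    rw [h] at h1; dsimp only at h1
    rw [h1, PySem.List.slice_from_natCast, drop_takeWhile_len, h]
    have h2 := fkFindEnd_spec (l :: suf) [] (by simp)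
    simp only [List.nil_append, List.length_nil, Nat.zero_add] at h2
    by_cases hq : PySem.Str.isIn "}" l = true
    · have hq2 := hq; simp at hq2
      have hd : (l :: suf).dropWhile pNoBrace = l :: suf := by simp [pNoBrace, hq2]
      have ht : (l :: suf).takeWhile pNoBrace = [] := by simp [pNoBrace, hq2]
      rw [hd, ht] at h2
      simp only [List.length_nil, Nat.cast_zero] at h2
      unfold fkAfterStart
      dsimp only
      rw [h2, show ((0 : Int) + 1) = ((1 : Nat) : Int) by norm_num,
          PySem.List.slice_to _ (by positivity), if_pos hq]
      simp only [Int.toNat_natCast, List.take_succ_cons, List.take_zero]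
      rw [slice_one_neg_one]
      rfl
    · have hq2 := hq; simp at hq2
      have hd : (l :: suf).dropWhile pNoBrace = suf.dropWhile pNoBrace := by
        simp [pNoBrace, hq2]
      have ht : (l :: suf).takeWhile pNoBrace = l :: suf.takeWhile pNoBrace := by
        simp [pNoBrace, hq2]
      rw [hd, ht] at h2
      cases hs : suf.dropWhile pNoBrace with
      | nil =>
        rw [hs] at h2
        unfold fkAfterStart
        dsimp only
        rw [h2, show ((-1 : Int) + 1) = ((0 : Nat) : Int) by norm_num,
            PySem.List.slice_to _ (by norm_num), if_neg hq, slice_one_neg_one, hs]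
        simp
      | cons q rest =>
        rw [hs] at h2
        simp only [List.length_cons] at h2
        unfold fkAfterStart
        dsimp only
        rw [h2]
        have hcast : (((suf.takeWhile pNoBrace).length + 1 : Nat) : Int) + 1
            = (((suf.takeWhile pNoBrace).length + 2 : Nat) : Int) := by push_cast; ring
        rw [hcast, PySem.List.slice_to _ (by positivity)]
        have hsuf : suf = suf.takeWhile pNoBrace ++ q :: rest := by
          conv_lhs => rw [← List.takeWhile_append_dropWhile (p := pNoBrace) (l := suf), hs]
        have htake : List.take ((suf.takeWhile pNoBrace).length + 2) (l :: suf)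
            = l :: (suf.takeWhile pNoBrace ++ [q]) := by
          rw [List.take_succ_cons]
          congr 1
          generalize hgen : suf.takeWhile pNoBrace = t at hsuf ⊢
          rw [hsuf, List.take_append, Nat.add_sub_cancel_left]
          simp
        simp only [Int.toNat_natCast, htake]
        rw [slice_one_neg_one,
            show l :: (suf.takeWhile pNoBrace ++ [q]) = (l :: suf.takeWhile pNoBrace) ++ [q] by simp,
            List.dropLast_concat, List.tail_cons, foldl_fkBody, if_neg hq, hs]
        rfl

lemma fkLoop_true : ∀ (suf buf : List String),
    fkLoop suf true buf =
      (match suf.dropWhile pNoBrace with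
       | [] => []
       | _ :: _ => (((buf ++ suf.takeWhile pNoBrace).map fkFmt).filterMap id)) := by
  intro suf
  induction suf with
  | nil => intro buf; rfl
  | cons c rest ih =>
    intro buf
    by_cases hc : PySem.Str.isIn "}" c = true
    · have hc2 := hc; simp at hc2
      have hd : List.dropWhile pNoBrace (c :: rest) = c :: rest := by simp [pNoBrace, hc2]
      have ht : List.takeWhile pNoBrace (c :: rest) = [] := by simp [pNoBrace, hc2]
      rw [fkLoop, if_pos hc, hd, ht]
      dsimp only
      rw [List.append_nil]
    · have hc2 := hc; simp at hc2
      have hd : List.dropWhile pNoBrace (c :: rest) = List.dropWhile pNoBrace rest := by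
        simp [pNoBrace, hc2]
      have ht : List.takeWhile pNoBrace (c :: rest) = c :: List.takeWhile pNoBrace rest := by
        simp [pNoBrace, hc2]
      rw [fkLoop, if_neg hc, ih, hd, ht]
      cases List.dropWhile pNoBrace rest with
      | nil => rfl
      | cons _ _ => rw [List.append_assoc]; rfl

lemma find_keycodes_alt_eq (lines : List String) : find_keycodes_alt lines = fkSpecVal lines := by
  unfold find_keycodes_alt fkSpecVal
  induction lines with
  | nil => rfl
  | cons c rest ih =>
    by_cases hc : PySem.Str.isIn "custom_keycodes" c = true
    · have hc2 := hc; simp at hc2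
      have hd : List.dropWhile pNoCustom (c :: rest) = c :: rest := by simp [pNoCustom, hc2]
      rw [hd]
      dsimp only
      by_cases hq : PySem.Str.isIn "}" c = true
      · rw [fkLoop, if_pos hc, if_pos hq, if_pos hq]
      · rw [fkLoop, if_pos hc, if_neg hq, if_neg hq, fkLoop_true]
        cases List.dropWhile pNoBrace rest <;> dsimp only <;> rw [List.nil_append]
    · have hc2 := hc; simp at hc2
      have hd : List.dropWhile pNoCustom (c :: rest) = List.dropWhile pNoCustom rest := by
        simp [pNoCustom, hc2]
      rw [fkLoop, if_neg hc, ih, hd]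

-- ===== VERDICT (by name: the statement is the Claim_ definition above) =====
theorem find_keycodes_spec : Claim_equal_find_keycodes := by
  intro lines _
  unfold Spec_find_keycodes
  rw [find_keycodes_eq, find_keycodes_alt_eq]
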